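-- pv_equiv track=rewrite | github.com/carlosjc03/Byte-Changer | ByteChanger-GUI.py | reverse_bytes
-- ===== SOURCE A (Python) =====
-- def join_bytes(text):
--     return text.replace(" ", "")
--
-- def split_by_lines(text):
--     text = join_bytes(text)
--     return [text[i:i+8] for i in range(0, len(text), 8)]
--
-- def reverse_bytes(text):
--     lines = split_by_lines(text)
--     new_list = []
--
--     for line in lines:
--         reversed_bytes = line[::-1]
--         text, text2, text3 = "", "", ""
--
--         for i, byte in enumerate(reversed_bytes):
--             if i % 2 == 0:
--                 text2 += byte
--             else:
--                 text += byte
--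
--         for i in range(len(text)):
--             text3 += text[i] + text2[i]
--
--         new_list.append(text3.upper())
--
--     return new_list
-- ===== SOURCE B (Python) =====
-- def reverse_bytes(text):
--     s = text.replace(" ", "")
--     out = []
--     for i in range(0, len(s), 8):
--         chunk = s[i:i+8]
--         pairs = [chunk[k:k+2] for k in range(len(chunk) % 2, len(chunk), 2)]
--         out.append("".join(reversed(pairs)).upper())
--     return out
-- ===== Notes on version B (the rewrite author's own statement) =====
-- stated objective: simpler
-- what changed: Instead of reversing each chunk, de-interleaving it into two accumulator strings and re-interleaving them, B splits each chunk (skipping its first char when the length is odd) directly into 2-char pairs and concatenates the pairs in reverse order.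
import Mathlib
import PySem

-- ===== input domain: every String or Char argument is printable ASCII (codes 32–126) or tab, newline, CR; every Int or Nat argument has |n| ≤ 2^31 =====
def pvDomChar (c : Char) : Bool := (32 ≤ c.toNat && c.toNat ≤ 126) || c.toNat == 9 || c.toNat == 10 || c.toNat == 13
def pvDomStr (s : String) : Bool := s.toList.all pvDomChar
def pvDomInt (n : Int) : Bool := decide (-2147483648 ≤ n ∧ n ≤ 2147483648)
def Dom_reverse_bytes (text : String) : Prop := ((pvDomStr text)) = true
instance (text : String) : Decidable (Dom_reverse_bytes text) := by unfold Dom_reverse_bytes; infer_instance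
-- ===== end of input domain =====

-- B replaces A's reverse / de-interleave / re-interleave of each chunk by cutting the chunk
-- directly into 2-char pairs and concatenating them back to front (same cost; simpler).

-- ===== PORT A =====
-- text.replace(" ", "")  (strings are modelled on List Char as PYSEM.md directs)
def join_bytes (text : List Char) : List Char := PySem.Chars.replace text [' '] []

-- [text[i:i+8] for i in range(0, len(text), 8)]
def split_by_lines (text : List Char) : List (List Char) :=
  let t := join_bytes text
  (PySem.List.pyRange 0 (t.length : Int) 8).map
    (fun i => PySem.List.slice t (some i) (some (i + 8)))

def reverse_bytes (text : String) : List String :=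
  let lines := split_by_lines text.toList
  lines.foldl
    (fun new_list line =>
      -- line[::-1]; step -1 never raises, so the Option is always some
      let reversed_bytes := (PySem.List.slice? line none none (-1)).getD []
      -- for i, byte in enumerate(...): if i % 2 == 0: text2 += byte else: text += byte
      -- state st = (text, text2)
      let st := (PySem.List.enumerate reversed_bytes 0).foldl
        (fun (st : List Char × List Char) ib =>
          if PySem.Int.mod ib.1 2 == 0 then (st.1, st.2 ++ [ib.2])
          else (st.1 ++ [ib.2], st.2)) ([], [])
      -- for i in range(len(text)): text3 += text[i] + text2[i]
      -- (both indexings are in range for every reachable state: len(text) ≤ len(text2);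
      --  Python never raises here, so pyGetD's default is never read)
      let text3 := (PySem.List.pyRange 0 (st.1.length : Int) 1).foldl
        (fun acc i => acc ++ [PySem.List.pyGetD st.1 i ' ', PySem.List.pyGetD st.2 i ' ']) []
      new_list ++ [String.ofList (PySem.Chars.upper text3)]) []

-- ===== PORT B =====
def reverse_bytes_alt (text : String) : List String :=
  let s := PySem.Chars.replace text.toList [' '] []
  (PySem.List.pyRange 0 (s.length : Int) 8).map
    (fun i =>
      let chunk := PySem.List.slice s (some i) (some (i + 8))
      -- pairs = [chunk[k:k+2] for k in range(len(chunk) % 2, len(chunk), 2)]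
      let pairs := (PySem.List.pyRange ((chunk.length % 2 : Nat) : Int) (chunk.length : Int) 2).map
        (fun k => PySem.List.slice chunk (some k) (some (k + 2)))
      -- "".join(reversed(pairs)).upper()
      String.ofList (PySem.Chars.upper (PySem.Chars.join [] pairs.reverse)))

-- ===== PRECONDITION & SPEC =====
def Spec_reverse_bytes (text : String) (out : List String) : Prop := out = reverse_bytes_alt text
instance (text : String) (out : List String) : Decidable (Spec_reverse_bytes text out) := by unfold Spec_reverse_bytes; infer_instance

-- ===== CLAIM (what is proved, stated in full; the proofs are below) =====
def Claim_equal_reverse_bytes : Prop := ∀ (text : String), Dom_reverse_bytes text → Spec_reverse_bytes text (reverse_bytes text)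

-- ===== LEMMAS AND PROOFS =====

-- canonical value of both chunk transforms: swap within consecutive pairs of the
-- reversed chunk, dropping a trailing unpaired char
def swp : List Char → List Char
  | [] => []
  | [_] => []
  | a :: b :: t => b :: a :: swp t

-- chars at even / odd positions
def evens : List Char → List Char
  | [] => []
  | [a] => [a]
  | a :: _ :: t => a :: evens t

def odds : List Char → List Char
  | [] => []
  | [_] => []
  | _ :: b :: t => b :: odds t

theorem two_step_ind {P : List Char → Prop} (h0 : P []) (h1 : ∀ a, P [a])
    (h2 : ∀ a b t, P t → P (a :: b :: t)) : ∀ l, P l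
  | [] => h0
  | [a] => h1 a
  | a :: b :: t => h2 a b t (two_step_ind h0 h1 h2 t)

theorem length_odds_le_evens : ∀ r : List Char, (odds r).length ≤ (evens r).length := by
  intro r
  induction r using two_step_ind with
  | h0 => simp [odds, evens]
  | h1 a => simp [odds, evens]
  | h2 a b t ih => simpa [odds, evens] using ih

-- A's enumerate loop computes (odds r, evens r)
theorem enum_fold (r : List Char) : ∀ (n : Int) (x y : List Char),
    (PySem.List.enumerate r n).foldl
      (fun (st : List Char × List Char) ib =>
        if PySem.Int.mod ib.1 2 == 0 then (st.1, st.2 ++ [ib.2])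
        else (st.1 ++ [ib.2], st.2)) (x, y)
    = if 2 ∣ n then (x ++ odds r, y ++ evens r)
      else (x ++ evens r, y ++ odds r) := by
  induction r using two_step_ind with
  | h0 => intro n x y; by_cases hd : (2 : Int) ∣ n <;>
      simp [PySem.List.enumerate_nil, hd, odds, evens]
  | h1 a =>
      intro n x y
      by_cases hd : (2 : Int) ∣ n <;>
        simp [PySem.List.enumerate_cons, PySem.List.enumerate_nil, hd, odds, evens]
  | h2 a b t ih =>
      intro n x y
      by_cases hd : (2 : Int) ∣ n
      · have h1 : ¬ (2 : Int) ∣ (n + 1) := by omega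
        have h2 : (2 : Int) ∣ (n + 1 + 1) := by omega
        have h' := ih (n + 1 + 1) (x ++ [b]) (y ++ [a])
        simp [h2] at h'
        simp [PySem.List.enumerate_cons, hd, h1, odds, evens, h']
      · have h1 : (2 : Int) ∣ (n + 1) := by omega
        have h2 : ¬ (2 : Int) ∣ (n + 1 + 1) := by omega
        have h' := ih (n + 1 + 1) (x ++ [a]) (y ++ [b])
        simp [h2] at h'
        simp [PySem.List.enumerate_cons, hd, h1, odds, evens, h']

-- interleaving u and v position by position (u no longer than v)
def interl : List Char → List Char → List Char
  | [], _ => []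
  | _, [] => []
  | a :: u, b :: v => a :: b :: interl u v

theorem flatMap_range_interl (d : Char) : ∀ (u v : List Char), u.length ≤ v.length →
    (List.range u.length).flatMap (fun k => [u[k]?.getD d, v[k]?.getD d]) = interl u v := by
  intro u
  induction u with
  | nil => intro v _; simp [interl]
  | cons a u ih =>
      intro v hlen
      cases v with
      | nil => simp at hlen
      | cons b v =>
          have hlen' : u.length ≤ v.length := by simpa using hlen
          rw [List.length_cons, List.range_succ_eq_map, List.flatMap_cons, List.flatMap_map]
          simp only [List.getElem?_cons_succ, List.getElem?_cons_zero,
            Option.getD_some]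
          simp [ih v hlen', interl]

theorem interl_odds_evens : ∀ r : List Char, interl (odds r) (evens r) = swp r := by
  intro r
  induction r using two_step_ind with
  | h0 => simp [odds, evens, interl, swp]
  | h1 a => simp [odds, evens, interl, swp]
  | h2 a b t ih => simp [odds, evens, interl, swp, ih]

-- A's third loop, in closed form
theorem text3_fold (u v : List Char) (h : u.length ≤ v.length) :
    (PySem.List.pyRange 0 (u.length : Int) 1).foldl
      (fun acc i => acc ++ [PySem.List.pyGetD u i ' ', PySem.List.pyGetD v i ' ']) []
    = interl u v := by
  rw [PySem.List.pyRange_of_pos 0 (u.length : Int) (by norm_num)]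
  have hcount : (if (0 : Int) < (u.length : Int)
      then (((u.length : Int) - 0 + 1 - 1) / 1).toNat else 0) = u.length := by
    split <;> omega
  rw [hcount, List.foldl_map, PySem.List.foldl_append_eq_flatMap]
  simpa using flatMap_range_interl ' ' u v h

-- join with empty separator is concatenation
theorem join_nil_eq_flatten : ∀ cs : List (List Char), PySem.Chars.join [] cs = cs.flatten := by
  intro cs
  induction cs with
  | nil => simp [PySem.Chars.join_nil]
  | cons p rest ih =>
      cases rest with
      | nil => simp [PySem.Chars.join_singleton]
      | cons q rest' => simp [PySem.Chars.join_cons_cons, ih]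

-- B's pair list grows by one pair when two chars are appended at the back
theorem pairs_append (u : List Char) (x y : Char) :
    (PySem.List.pyRange (((u ++ [x, y]).length % 2 : Nat) : Int) (((u ++ [x, y]).length : Nat) : Int) 2).map
      (fun k => PySem.List.slice (u ++ [x, y]) (some k) (some (k + 2)))
    = (PySem.List.pyRange ((u.length % 2 : Nat) : Int) ((u.length : Nat) : Int) 2).map
        (fun k => PySem.List.slice u (some k) (some (k + 2))) ++ [[x, y]] := by
  have hL : (u ++ [x, y]).length = u.length + 2 := by simp
  set n := u.length with hn
  set o := n % 2 with ho
  have ho2 : (n + 2) % 2 = o := by omega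
  rw [hL, ho2]
  rw [PySem.List.pyRange_of_pos ((o : Nat) : Int) ((n + 2 : Nat) : Int) (by norm_num),
      PySem.List.pyRange_of_pos ((o : Nat) : Int) ((n : Nat) : Int) (by norm_num)]
  have hc2 : (if ((o : Nat) : Int) < ((n + 2 : Nat) : Int)
      then ((((n + 2 : Nat) : Int) - ((o : Nat) : Int) + 2 - 1) / 2).toNat else 0)
      = (n - o) / 2 + 1 := by
    rw [if_pos (by exact_mod_cast (by omega : o < n + 2))]
    omega
  have hc1 : (if ((o : Nat) : Int) < ((n : Nat) : Int)
      then ((((n : Nat) : Int) - ((o : Nat) : Int) + 2 - 1) / 2).toNat else 0)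
      = (n - o) / 2 := by
    by_cases hlt : o < n
    · rw [if_pos (by exact_mod_cast hlt)]; omega
    · rw [if_neg (by exact_mod_cast hlt)]; omega
  rw [hc1, hc2, List.map_map, List.map_map, List.range_succ, List.map_append]
  -- an index expressed as o + 2*j is the natural number o + 2*j
  have hcast : ∀ j : Nat, (((o : Nat) : Int) + 2 * (j : Nat)) = ((o + 2 * j : Nat) : Int) := by
    intro j; push_cast; ring
  have hslice : ∀ (w : List Char) (i : Nat),
      PySem.List.slice w (some ((i : Nat) : Int)) (some (((i : Nat) : Int) + 2)) = (w.drop i).take 2 := by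
    intro w i
    have h2 : ((i : Nat) : Int) + 2 = ((i : Nat) : Int) + ((2 : Nat) : Int) := by norm_num
    rw [h2, PySem.List.slice_natCast_add]
  congr 1
  · apply List.map_congr_left
    intro j hj
    have hjm : j < (n - o) / 2 := List.mem_range.mp hj
    simp only [Function.comp]
    rw [hcast j, hslice (u ++ [x, y]) (o + 2 * j), hslice u (o + 2 * j)]
    have hb : o + 2 * j ≤ n := by omega
    rw [List.drop_append_of_le_length hb]
    exact List.take_append_of_le_length (by simp; omega)
  · simp only [Function.comp, List.map_cons, List.map_nil]
    rw [hcast ((n - o) / 2), (by omega : o + 2 * ((n - o) / 2) = n),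
        hslice (u ++ [x, y]) n, hn, List.drop_left]
    simp

-- B's per-chunk value is swp of the reversed chunk
theorem pairs_join (l : List Char) :
    PySem.Chars.join []
      ((PySem.List.pyRange ((l.length % 2 : Nat) : Int) ((l.length : Nat) : Int) 2).map
        (fun k => PySem.List.slice l (some k) (some (k + 2)))).reverse
    = swp l.reverse := by
  suffices h : ∀ r : List Char,
      PySem.Chars.join []
        ((PySem.List.pyRange ((r.reverse.length % 2 : Nat) : Int) ((r.reverse.length : Nat) : Int) 2).map
          (fun k => PySem.List.slice r.reverse (some k) (some (k + 2)))).reverse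
      = swp r by
    have := h l.reverse
    rwa [List.reverse_reverse] at this
  intro r
  induction r using two_step_ind with
  | h0 => simp [swp]; decide
  | h1 a =>
      simp [swp, PySem.Chars.join_nil,
        show PySem.List.pyRange 1 1 2 = ([] : List Int) from by decide]
  | h2 y x t ih =>
      have hrev : (y :: x :: t).reverse = t.reverse ++ [x, y] := by simp
      rw [hrev, pairs_append, List.reverse_append, join_nil_eq_flatten]
      rw [join_nil_eq_flatten] at ih
      push_cast at ih
      simp only [List.length_reverse] at ih
      simp [swp, ih]

-- A's per-chunk value equals B's per-chunk value, for any chunk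
theorem chunk_eq (l : List Char) :
    (let reversed_bytes := (PySem.List.slice? l none none (-1)).getD []
     let st := (PySem.List.enumerate reversed_bytes 0).foldl
       (fun (st : List Char × List Char) ib =>
         if PySem.Int.mod ib.1 2 == 0 then (st.1, st.2 ++ [ib.2])
         else (st.1 ++ [ib.2], st.2)) ([], [])
     let text3 := (PySem.List.pyRange 0 (st.1.length : Int) 1).foldl
       (fun acc i => acc ++ [PySem.List.pyGetD st.1 i ' ', PySem.List.pyGetD st.2 i ' ']) []
     String.ofList (PySem.Chars.upper text3))
    = (let pairs := (PySem.List.pyRange ((l.length % 2 : Nat) : Int) ((l.length : Nat) : Int) 2).map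
         (fun k => PySem.List.slice l (some k) (some (k + 2)))
       String.ofList (PySem.Chars.upper (PySem.Chars.join [] pairs.reverse))) := by
  simp only [PySem.List.slice?_none_none_neg_one, Option.getD_some]
  have hst := enum_fold l.reverse 0 [] []
  rw [if_pos (by omega : (2 : Int) ∣ 0)] at hst
  simp only [List.nil_append] at hst
  rw [hst, text3_fold (odds l.reverse) (evens l.reverse) (length_odds_le_evens l.reverse),
      interl_odds_evens, pairs_join]

-- ===== VERDICT (by name: the statement is the Claim_ definition above) =====
theorem reverse_bytes_spec : Claim_equal_reverse_bytes := by
  intro text _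
  unfold Spec_reverse_bytes reverse_bytes reverse_bytes_alt split_by_lines join_bytes
  simp only []
  rw [PySem.List.foldl_append_singleton_eq_map
    (f := fun line =>
      let reversed_bytes := (PySem.List.slice? line none none (-1)).getD []
      let st := (PySem.List.enumerate reversed_bytes 0).foldl
        (fun (st : List Char × List Char) ib =>
          if PySem.Int.mod ib.1 2 == 0 then (st.1, st.2 ++ [ib.2])
          else (st.1 ++ [ib.2], st.2)) ([], [])
      let text3 := (PySem.List.pyRange 0 (st.1.length : Int) 1).foldl
        (fun acc i => acc ++ [PySem.List.pyGetD st.1 i ' ', PySem.List.pyGetD st.2 i ' ']) []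
      String.ofList (PySem.Chars.upper text3))]
  rw [List.nil_append, List.map_map]
  apply List.map_congr_left
  intro i _
  exact chunk_eq (PySem.List.slice (PySem.Chars.replace text.toList [' '] []) (some i) (some (i + 8)))
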